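-- pv_equiv track=rewrite | github.com/AlgoBitConsulting/scatteringWaveletsNetwork | tableFinder.py | filterHL
-- ===== SOURCE A (Python) =====
-- def filterHL(rLN_TA, rLN_HL, d=20):
--
--    ERG = []
--    for ii in range(len(rLN_HL)):
--       x1,y1,x2,y2 = boxHL = rLN_HL[ii][0]
--       for jj in range(len(rLN_TA)):
--          v1, w1, v2, w2 = boxTA = rLN_TA[jj][0]
--          if y1 <= w1 <= y2 <= w2 and abs(x1-v1)<= d and abs(x2-v2)<= d:
--             ERG.append(rLN_HL[ii])
--
--    return(ERG)
-- ===== SOURCE B (Python) =====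
-- def filterHL(rLN_TA, rLN_HL, d=20):
--     # Sort the TA head boxes by w1 once; per HL row binary-search the window
--     # y1 <= w1 <= y2 and test the remaining conditions only inside that window.
--     if not rLN_HL:
--         return []
--     heads = sorted((r[0] for r in rLN_TA), key=lambda b: b[1])
--     ws = [b[1] for b in heads]
--
--     def bisect(x, right):
--         lo, hi = 0, len(ws)
--         while lo < hi:
--             mid = (lo + hi) // 2
--             if (ws[mid] <= x) if right else (ws[mid] < x):
--                 lo = mid + 1
--             else:
--                 hi = mid
--         return lo
--
--     ERG = []
--     for row in rLN_HL:
--         x1, y1, x2, y2 = row[0]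
--         n = 0
--         for v1, w1, v2, w2 in heads[bisect(y1, False):bisect(y2, True)]:
--             if y2 <= w2 and abs(x1 - v1) <= d and abs(x2 - v2) <= d:
--                 n += 1
--         ERG += [row] * n
--     return ERG
-- ===== Notes on version B (the rewrite author's own statement) =====
-- stated objective: alternative
-- what changed: B sorts the TA head boxes by w1 once and per HL row binary-searches the window y1 <= w1 <= y2, counting the remaining conditions only on that slice and emitting [row]*n at once, instead of A's nested loop testing every TA row per HL row.
import Mathlib
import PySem

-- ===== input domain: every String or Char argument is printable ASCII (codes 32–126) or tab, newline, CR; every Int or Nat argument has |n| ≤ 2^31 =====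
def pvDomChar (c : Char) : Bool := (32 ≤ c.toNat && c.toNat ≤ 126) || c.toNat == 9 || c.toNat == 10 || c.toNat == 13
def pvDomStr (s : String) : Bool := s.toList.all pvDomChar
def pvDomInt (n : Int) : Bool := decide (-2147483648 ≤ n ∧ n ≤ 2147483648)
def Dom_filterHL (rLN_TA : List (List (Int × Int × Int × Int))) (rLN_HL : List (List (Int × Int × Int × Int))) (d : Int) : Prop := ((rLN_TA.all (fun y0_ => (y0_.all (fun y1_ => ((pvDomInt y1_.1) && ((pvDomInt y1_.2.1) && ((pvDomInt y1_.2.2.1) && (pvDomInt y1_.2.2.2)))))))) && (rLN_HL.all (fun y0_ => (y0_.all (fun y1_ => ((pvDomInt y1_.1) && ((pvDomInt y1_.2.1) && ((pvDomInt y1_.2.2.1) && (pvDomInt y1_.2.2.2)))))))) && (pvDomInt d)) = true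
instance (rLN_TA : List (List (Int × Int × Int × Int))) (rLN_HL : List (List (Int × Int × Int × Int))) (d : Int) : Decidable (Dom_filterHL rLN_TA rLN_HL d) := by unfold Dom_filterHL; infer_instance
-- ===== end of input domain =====

-- B sorts the TA head boxes by w1 once and, per HL row, binary-searches the window
-- y1 <= w1 <= y2 and counts matches only inside that slice (objective: alternative algorithm).


-- ===== PORT A =====
-- literal transliteration of A: nested loops, append the HL row once per matching TA box.
-- row[0] on an empty row raises IndexError in Python (PySem.List.pyGet? = none): excluded by Pre_.
def filterHL (rLN_TA : List (List (Int × Int × Int × Int))) (rLN_HL : List (List (Int × Int × Int × Int))) (d : Int) : List (List (Int × Int × Int × Int)) :=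
  rLN_HL.foldl (fun ERG row =>
    match PySem.List.pyGet? row 0 with
    | none => ERG
    | some (x1, y1, x2, y2) =>
      rLN_TA.foldl (fun ERG r =>
        match PySem.List.pyGet? r 0 with
        | none => ERG
        | some (v1, w1, v2, w2) =>
          if y1 ≤ w1 ∧ w1 ≤ y2 ∧ y2 ≤ w2 ∧ |x1 - v1| ≤ d ∧ |x2 - v2| ≤ d
          then ERG ++ [row] else ERG) ERG) []

-- ===== PORT B =====
-- Source B's hand-written binary search (`def bisect(x, right)`): while lo < hi, halve on ws[mid].
-- ws[mid] is read with getD: the loop only reads indices mid with lo ≤ mid < hi ≤ len(ws),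
-- always in range, so this is exact for Python's ws[mid].
def pvBisect (ws : List Int) (x : Int) (right : Bool) (lo hi : Nat) : Nat :=
  if h : lo < hi then
    let mid := (lo + hi) / 2
    if (if right then ws.getD mid 0 ≤ x else ws.getD mid 0 < x)
    then pvBisect ws x right (mid + 1) hi
    else pvBisect ws x right lo mid
  else lo
termination_by hi - lo
decreasing_by all_goals omega

-- transliteration of Source B: sort the TA head boxes by w1, build the key list ws, and per HL
-- row count the residual conditions on the slice heads[bisect(y1,False):bisect(y2,True)].
def filterHL_alt (rLN_TA : List (List (Int × Int × Int × Int))) (rLN_HL : List (List (Int × Int × Int × Int))) (d : Int) : List (List (Int × Int × Int × Int)) :=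
  if rLN_HL.isEmpty then []
  else
    let heads := PySem.List.sorted (rLN_TA.filterMap (fun r => PySem.List.pyGet? r 0)) (fun b => b.2.1) false
    let ws := heads.map (fun b => b.2.1)
    rLN_HL.foldl (fun ERG row =>
      match PySem.List.pyGet? row 0 with
      | none => ERG
      | some (x1, y1, x2, y2) =>
        let n : Int :=
          (PySem.List.slice heads (some ((pvBisect ws y1 false 0 ws.length : Nat) : Int))
                                  (some ((pvBisect ws y2 true 0 ws.length : Nat) : Int))).foldl
            (fun n b => if y2 ≤ b.2.2.2 ∧ |x1 - b.1| ≤ d ∧ |x2 - b.2.2.1| ≤ d then n + 1 else n) 0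
        ERG ++ PySem.List.pyRepeat [row] n) []

-- ===== PRECONDITION & SPEC =====
-- Pre_ excludes exactly the inputs where Python A raises IndexError on row[0]:
-- an empty inner list of rLN_HL, or (when rLN_HL is nonempty, so the inner loop runs) of rLN_TA.
def Pre_filterHL (rLN_TA : List (List (Int × Int × Int × Int))) (rLN_HL : List (List (Int × Int × Int × Int))) (d : Int) : Prop :=
  (∀ row ∈ rLN_HL, row ≠ []) ∧ (rLN_HL ≠ [] → ∀ r ∈ rLN_TA, r ≠ [])
instance (rLN_TA : List (List (Int × Int × Int × Int))) (rLN_HL : List (List (Int × Int × Int × Int))) (d : Int) : Decidable (Pre_filterHL rLN_TA rLN_HL d) := by unfold Pre_filterHL; infer_instance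

def pvWitness_filterHL : (List (List (Int × Int × Int × Int))) × (List (List (Int × Int × Int × Int))) × Int :=
  ([[(0, 0, 10, 10)], [(5, 1, 12, 9)]], [[(2, 0, 11, 10)]], 20)

def Spec_filterHL (rLN_TA : List (List (Int × Int × Int × Int))) (rLN_HL : List (List (Int × Int × Int × Int))) (d : Int) (out : List (List (Int × Int × Int × Int))) : Prop := out = filterHL_alt rLN_TA rLN_HL d
instance (rLN_TA : List (List (Int × Int × Int × Int))) (rLN_HL : List (List (Int × Int × Int × Int))) (d : Int) (out : List (List (Int × Int × Int × Int))) : Decidable (Spec_filterHL rLN_TA rLN_HL d out) := by unfold Spec_filterHL; infer_instance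

-- ===== CLAIM (what is proved, stated in full; the proofs are below) =====
def Claim_equal_filterHL : Prop := ∀ (rLN_TA : List (List (Int × Int × Int × Int))) (rLN_HL : List (List (Int × Int × Int × Int))) (d : Int), Dom_filterHL rLN_TA rLN_HL d → Pre_filterHL rLN_TA rLN_HL d → Spec_filterHL rLN_TA rLN_HL d (filterHL rLN_TA rLN_HL d)

-- ===== LEMMAS AND PROOFS =====
-- A's full match predicate on a TA head box, for a given HL box and d
abbrev pvMatch (d x1 y1 x2 y2 : Int) (b : Int × Int × Int × Int) : Prop :=
  y1 ≤ b.2.1 ∧ b.2.1 ≤ y2 ∧ y2 ≤ b.2.2.2 ∧ |x1 - b.1| ≤ d ∧ |x2 - b.2.2.1| ≤ d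

-- B's residual predicate, tested inside the w1-window
abbrev pvRes (d x1 x2 y2 : Int) (b : Int × Int × Int × Int) : Prop :=
  y2 ≤ b.2.2.2 ∧ |x1 - b.1| ≤ d ∧ |x2 - b.2.2.1| ≤ d

-- the loop condition of pvBisect, as a predicate on a key value
abbrev pvCmp (x : Int) (right : Bool) (w : Int) : Prop := if right then w ≤ x else w < x

theorem pvCmp_false_iff (x w : Int) : pvCmp x false w ↔ w < x := by simp [pvCmp]

theorem pvCmp_true_iff (x w : Int) : pvCmp x true w ↔ w ≤ x := by simp [pvCmp]

theorem pvCmp_anti (x : Int) (right : Bool) (w w' : Int) (hle : w ≤ w')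
    (h : pvCmp x right w') : pvCmp x right w := by
  cases right <;> simp [pvCmp] at * <;> omega

-- invariant of Source B's binary search: below the result pvCmp holds, at or above it fails
theorem pvBisect_spec (ws : List Int) (x : Int) (right : Bool)
    (hs : ws.Pairwise (· ≤ ·)) :
    ∀ (fuel lo hi : Nat), hi - lo ≤ fuel → lo ≤ hi → hi ≤ ws.length →
      (∀ j (hj : j < ws.length), j < lo → pvCmp x right ws[j]) →
      (∀ j (hj : j < ws.length), hi ≤ j → ¬ pvCmp x right ws[j]) →
      ((∀ j (hj : j < ws.length), j < pvBisect ws x right lo hi → pvCmp x right ws[j]) ∧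
       (∀ j (hj : j < ws.length), pvBisect ws x right lo hi ≤ j → ¬ pvCmp x right ws[j])) := by
  have hpg : ∀ (i j : Nat) (hi : i < ws.length) (hj : j < ws.length), i ≤ j → ws[i] ≤ ws[j] := by
    intro i j hi hj hij
    rcases Nat.lt_or_ge i j with h | h
    · exact List.pairwise_iff_getElem.mp hs i j hi hj h
    · have : i = j := by omega
      subst this; exact le_refl _
  intro fuel
  induction fuel with
  | zero =>
    intro lo hi hfuel hle _ hlow hhigh
    have heq : lo = hi := by omega
    subst heq
    rw [pvBisect, dif_neg (lt_irrefl lo)]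
    exact ⟨hlow, fun j hj hge => hhigh j hj hge⟩
  | succ f ih =>
    intro lo hi hfuel hle hlen hlow hhigh
    by_cases hlt : lo < hi
    · rw [pvBisect, dif_pos hlt]
      have hml : lo ≤ (lo + hi) / 2 := by omega
      have hmh : (lo + hi) / 2 < hi := by omega
      have hmlen : (lo + hi) / 2 < ws.length := by omega
      have hget : ws.getD ((lo + hi) / 2) 0 = ws[(lo + hi) / 2] := List.getD_eq_getElem ws 0 hmlen
      by_cases hc : (if right then ws.getD ((lo + hi) / 2) 0 ≤ x else ws.getD ((lo + hi) / 2) 0 < x)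
      · simp only [if_pos hc]
        have hcm : pvCmp x right ws[(lo + hi) / 2] := by
          unfold pvCmp; rwa [hget] at hc
        refine ih ((lo + hi) / 2 + 1) hi (by omega) (by omega) hlen ?_ hhigh
        intro j hj hjm
        exact pvCmp_anti x right _ _ (hpg j _ hj hmlen (by omega)) hcm
      · simp only [if_neg hc]
        have hnc : ¬ pvCmp x right ws[(lo + hi) / 2] := by
          unfold pvCmp; rwa [hget] at hc
        refine ih lo ((lo + hi) / 2) (by omega) (by omega) (by omega) hlow ?_
        intro j hj hge hcmj
        exact hnc (pvCmp_anti x right _ _ (hpg _ j hmlen hj hge) hcmj)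
    · rw [pvBisect, dif_neg hlt]
      have heq : lo = hi := by omega
      exact ⟨hlow, fun j hj hge => hhigh j hj (heq ▸ hge)⟩

-- counting a predicate over a list equals counting the residual over the window slice
theorem pv_countP_window {α : Type} (l : List α) (P R : α → Bool) (lo hi : Nat)
    (h1 : ∀ (j : Nat) (hj : j < l.length), j < lo → P l[j] = false)
    (h2 : ∀ (j : Nat) (hj : j < l.length), hi ≤ j → P l[j] = false)
    (h3 : ∀ (j : Nat) (hj : j < l.length), lo ≤ j → j < hi → P l[j] = R l[j]) :
    l.countP P = ((l.drop lo).take (hi - lo)).countP R := by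
  by_cases hlh : lo ≤ hi
  · conv_lhs => rw [← List.take_append_drop lo l]
    rw [List.countP_append]
    have htake : (l.take lo).countP P = 0 := by
      rw [List.countP_eq_zero]
      intro a ha
      obtain ⟨i, hi', hEq⟩ := List.mem_iff_getElem.mp ha
      have hil : i < min lo l.length := by simpa [List.length_take] using hi'
      have hilen : i < l.length := by omega
      have hilo : i < lo := by omega
      rw [← hEq, List.getElem_take]
      simp [h1 i hilen hilo]
    conv_lhs => rw [← List.take_append_drop (hi - lo) (l.drop lo)]
    rw [List.countP_append, List.drop_drop]
    have hdd : lo + (hi - lo) = hi := by omega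
    rw [hdd]
    have hdrop : (l.drop hi).countP P = 0 := by
      rw [List.countP_eq_zero]
      intro a ha
      obtain ⟨i, hi', hEq⟩ := List.mem_iff_getElem.mp ha
      rw [← hEq, List.getElem_drop]
      have hlen' : hi + i < l.length := by
        have := hi'; simp [List.length_drop] at this; omega
      simp [h2 (hi + i) hlen' (by omega)]
    have hmid : ((l.drop lo).take (hi - lo)).countP P = ((l.drop lo).take (hi - lo)).countP R := by
      apply List.countP_congr
      intro a ha
      obtain ⟨i, hi', hEq⟩ := List.mem_iff_getElem.mp ha
      have h1' : i < min (hi - lo) (l.length - lo) := by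
        simpa [List.length_take, List.length_drop] using hi'
      have hilen : lo + i < l.length := by omega
      rw [← hEq, List.getElem_take, List.getElem_drop,
        h3 (lo + i) hilen (by omega) (by omega)]
    rw [htake, hdrop, hmid]
    omega
  · have h0 : hi - lo = 0 := by omega
    rw [h0]
    simp only [List.take_zero, List.countP_nil]
    rw [List.countP_eq_zero]
    intro a ha
    obtain ⟨i, hi', hEq⟩ := List.mem_iff_getElem.mp ha
    rcases Nat.lt_or_ge i lo with h | h
    · rw [← hEq]; simp [h1 i hi' h]
    · rw [← hEq]; simp [h2 i hi' (by omega)]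

-- A's inner loop over rLN_TA appends `row` once per matching TA head box
theorem pv_innerA (d x1 y1 x2 y2 : Int) (row : List (Int × Int × Int × Int)) :
    ∀ (TA : List (List (Int × Int × Int × Int))) (ERG : List (List (Int × Int × Int × Int))),
      TA.foldl (fun ERG r =>
        match PySem.List.pyGet? r 0 with
        | none => ERG
        | some (v1, w1, v2, w2) =>
          if y1 ≤ w1 ∧ w1 ≤ y2 ∧ y2 ≤ w2 ∧ |x1 - v1| ≤ d ∧ |x2 - v2| ≤ d
          then ERG ++ [row] else ERG) ERG
      = ERG ++ List.replicate
          (((TA.filterMap (fun r => PySem.List.pyGet? r 0)).countP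
            (fun b => decide (pvMatch d x1 y1 x2 y2 b))))
          row := by
  intro TA
  induction TA with
  | nil => intro ERG; simp
  | cons r t ih =>
    intro ERG
    cases h : PySem.List.pyGet? r 0 with
    | none => simp [List.foldl_cons, h, ih]
    | some b =>
      obtain ⟨v1, w1, v2, w2⟩ := b
      by_cases hc : y1 ≤ w1 ∧ w1 ≤ y2 ∧ y2 ≤ w2 ∧ |x1 - v1| ≤ d ∧ |x2 - v2| ≤ d
      · simp only [List.foldl_cons, h, if_pos hc, List.filterMap_cons, List.countP_cons, ih,
          decide_eq_true (show pvMatch d x1 y1 x2 y2 (v1, w1, v2, w2) from hc)]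
        simp [List.append_assoc, ← List.replicate_succ]
      · simp only [List.foldl_cons, h, if_neg hc, List.filterMap_cons, List.countP_cons, ih]
        simp [pvMatch, hc]

-- B's slice count equals A's full count over the unsorted head list
theorem pv_innerB (d x1 y1 x2 y2 : Int) (heads : List (Int × Int × Int × Int)) :
    (PySem.List.slice (PySem.List.sorted heads (fun b => b.2.1) false)
        (some (((pvBisect ((PySem.List.sorted heads (fun b => b.2.1) false).map (fun b => b.2.1)) y1 false 0
          ((PySem.List.sorted heads (fun b => b.2.1) false).map (fun b => b.2.1)).length : Nat) : Int)))
        (some (((pvBisect ((PySem.List.sorted heads (fun b => b.2.1) false).map (fun b => b.2.1)) y2 true 0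
          ((PySem.List.sorted heads (fun b => b.2.1) false).map (fun b => b.2.1)).length : Nat) : Int)))).foldl
      (fun n b => if y2 ≤ b.2.2.2 ∧ |x1 - b.1| ≤ d ∧ |x2 - b.2.2.1| ≤ d then n + 1 else n) (0 : Int)
    = (heads.countP (fun b => decide (pvMatch d x1 y1 x2 y2 b)) : Int) := by
  set sh := PySem.List.sorted heads (fun b => b.2.1) false with hsh
  set ws := sh.map (fun b => b.2.1) with hws
  have hlen : ws.length = sh.length := by simp [hws]
  have hpair : ws.Pairwise (· ≤ ·) := PySem.List.sorted_map_key_pairwise heads (fun b => b.2.1)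
  set lo := pvBisect ws y1 false 0 ws.length with hlo
  set hi := pvBisect ws y2 true 0 ws.length with hhi
  obtain ⟨hlo1, hlo2⟩ := pvBisect_spec ws y1 false hpair ws.length 0 ws.length (by omega) (by omega)
    (le_refl _) (by intro j hj h; omega) (by intro j hj h; omega)
  obtain ⟨hhi1, hhi2⟩ := pvBisect_spec ws y2 true hpair ws.length 0 ws.length (by omega) (by omega)
    (le_refl _) (by intro j hj h; omega) (by intro j hj h; omega)
  rw [PySem.List.slice_natCast]
  rw [PySem.List.foldl_ite_add_one]
  have hcount : sh.countP (fun b => decide (pvMatch d x1 y1 x2 y2 b))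
      = ((sh.drop lo).take (hi - lo)).countP (fun b => decide (pvRes d x1 x2 y2 b)) := by
    apply pv_countP_window
    · intro j hj hjlo
      have hjw : j < ws.length := by omega
      have hlt : sh[j].2.1 < y1 := by
        have h := (pvCmp_false_iff y1 _).mp (hlo1 j hjw hjlo)
        simpa [hws] using h
      simp only [decide_eq_false_iff_not, pvMatch]
      intro hm
      have := hm.1
      omega
    · intro j hj hjhi
      have hjw : j < ws.length := by omega
      have hgt : y2 < sh[j].2.1 := by
        have h := hhi2 j hjw hjhi
        rw [pvCmp_true_iff] at h
        have h2 := lt_of_not_ge h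
        simpa [hws] using h2
      simp only [decide_eq_false_iff_not, pvMatch]
      intro hm
      have := hm.2.1
      omega
    · intro j hj hjlo hjhi
      have hjw : j < ws.length := by omega
      have hge : y1 ≤ sh[j].2.1 := by
        have h := hlo2 j hjw hjlo
        rw [pvCmp_false_iff] at h
        have h2 := le_of_not_gt h
        simpa [hws] using h2
      have hle : sh[j].2.1 ≤ y2 := by
        have h := (pvCmp_true_iff y2 _).mp (hhi1 j hjw hjhi)
        simpa [hws] using h
      simp only [pvMatch, pvRes]
      simp [hge, hle]
  have hperm : sh.countP (fun b => decide (pvMatch d x1 y1 x2 y2 b))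
      = heads.countP (fun b => decide (pvMatch d x1 y1 x2 y2 b)) :=
    (PySem.List.sorted_perm heads (fun b => b.2.1) false).countP_eq _
  rw [← hperm, hcount]
  simp [pvRes]

theorem filterHL_spec : Claim_equal_filterHL := by
  intro rLN_TA rLN_HL d _ _
  unfold Spec_filterHL filterHL filterHL_alt
  by_cases hHL : rLN_HL = []
  · subst hHL; simp
  · rw [if_neg (by simp [hHL])]
    apply PySem.List.foldl_congr_mem
    intro ERG row _
    cases h : PySem.List.pyGet? row 0 with
    | none => simp only []
    | some b =>
      obtain ⟨x1, y1, x2, y2⟩ := b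
      simp only [pv_innerB, PySem.List.pyRepeat_singleton, Int.toNat_natCast]
      exact pv_innerA d x1 y1 x2 y2 row rLN_TA ERG
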